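-- pv_equiv track=rewrite | github.com/orionnelson/Selenium-Practice | anime_v2.py | selectBestQuality
-- ===== SOURCE A (Python) =====
-- def selectBestQuality(test):
--     test = [item for item in test if item is not None]
--     qchart =  ["'h'","'n'","'l'"]
--     for q in qchart:
--         in_list = [q in x for x in test]
--         if any(in_list):
--             return test[in_list.index(1)]
--     return ""
-- ===== SOURCE B (Python) =====
-- def selectBestQuality(test):
--     qchart = ["'h'", "'n'", "'l'"]
--     best_rank = 3
--     best = ""
--     for x in test:
--         if x is None:
--             continue
--         rank = next((r for r, q in enumerate(qchart) if q in x), None)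
--         if rank is not None and rank < best_rank:
--             best_rank = rank
--             best = x
--     return best
-- ===== Notes on version B (the rewrite author's own statement) =====
-- stated objective: alternative
-- what changed: Replaced A's marker-outer nested scan (one full boolean-map pass plus an index pass per quality marker) by a single left-to-right pass over the list that computes each string's marker rank and keeps the earliest string of strictly smallest rank.
import Mathlib
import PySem

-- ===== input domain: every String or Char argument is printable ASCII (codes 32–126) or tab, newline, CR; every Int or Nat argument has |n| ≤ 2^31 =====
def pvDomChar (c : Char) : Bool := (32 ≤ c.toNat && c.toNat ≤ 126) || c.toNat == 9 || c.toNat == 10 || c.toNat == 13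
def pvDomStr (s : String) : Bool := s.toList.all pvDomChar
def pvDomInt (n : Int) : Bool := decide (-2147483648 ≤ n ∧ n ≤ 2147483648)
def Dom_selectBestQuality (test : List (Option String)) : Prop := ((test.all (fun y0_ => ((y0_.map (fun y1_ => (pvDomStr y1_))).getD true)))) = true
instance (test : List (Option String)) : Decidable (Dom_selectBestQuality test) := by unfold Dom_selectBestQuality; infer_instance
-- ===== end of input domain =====

-- B replaces A's marker-outer nested scan by a single pass keeping the earliest string of
-- strictly smallest marker rank (objective: alternative decomposition, same cost).

-- ===== PORT A =====
-- the for-q loop with early return, over the None-filtered list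
def pvAGo (ts : List String) : List String → String
  | [] => ""
  | q :: qs =>
    let inList := ts.map (fun x => PySem.Str.isIn q x)
    if inList.any id then
      match PySem.List.index? inList true with
      | some i => PySem.List.pyGetD ts (i : Int) ""
      | none => ""
    else pvAGo ts qs

def selectBestQuality (test : List (Option String)) : String :=
  pvAGo (test.filterMap id) ["'h'", "'n'", "'l'"]

-- ===== PORT B =====
-- rank of x = index of the first marker of qs (numbered from r) contained in x
def pvRankFrom (x : String) (r : Nat) : List String → Option Nat
  | [] => none
  | q :: qs => if PySem.Str.isIn q x then some r else pvRankFrom x (r + 1) qs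

def pvAltStep (st : Nat × String) (ox : Option String) : Nat × String :=
  match ox with
  | none => st
  | some x =>
    match pvRankFrom x 0 ["'h'", "'n'", "'l'"] with
    | some r => if r < st.1 then (r, x) else st
    | none => st

def selectBestQuality_alt (test : List (Option String)) : String :=
  (test.foldl pvAltStep (3, "")).2

-- ===== PRECONDITION & SPEC =====
def Spec_selectBestQuality (test : List (Option String)) (out : String) : Prop := out = selectBestQuality_alt test
instance (test : List (Option String)) (out : String) : Decidable (Spec_selectBestQuality test out) := by unfold Spec_selectBestQuality; infer_instance

-- ===== CLAIM (what is proved, stated in full; the proofs are below) =====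
def Claim_equal_selectBestQuality : Prop := ∀ (test : List (Option String)), Dom_selectBestQuality test → Spec_selectBestQuality test (selectBestQuality test)

-- ===== LEMMAS AND PROOFS =====

-- A's per-marker scan (map to booleans, any over the map, index of the first True, get) is find?/getD
theorem pv_branch_eq_find (ts : List String) (p : String → Bool) (d : String) :
    (if (ts.map p).any id then
       match PySem.List.index? (ts.map p) true with
       | some i => PySem.List.pyGetD ts (i : Int) ""
       | none => ""
     else d) = (ts.find? p).getD d := by
  induction ts with
  | nil => simp
  | cons x ts ih =>
    by_cases hp : p x = true
    · simp [hp, PySem.List.index?_eq_idxOf?, List.idxOf?_cons]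
    · have hpf : p x = false := by simpa using hp
      simp only [List.map_cons, hpf, List.any_cons, id_eq, Bool.false_or,
        List.find?_cons_of_neg hp]
      rw [show PySem.List.index? (false :: List.map p ts) true
            = (PySem.List.index? (List.map p ts) true).map (· + 1) by
          simp [PySem.List.index?_eq_idxOf?, List.idxOf?_cons]]
      rw [← ih]
      by_cases hany : (List.map p ts).any id = true
      · simp only [hany, if_true]
        cases h : PySem.List.index? (List.map p ts) true with
        | none => rfl
        | some i =>
          show PySem.List.pyGetD (x :: ts) ((i + 1 : Nat) : Int) "" = PySem.List.pyGetD ts (i : Int) ""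
          rw [PySem.List.pyGetD_natCast, PySem.List.pyGetD_natCast]
          rfl
      · simp [hany]

-- B's None-skipping fold over test is a fold over the filtered list
def pvStepS (st : Nat × String) (x : String) : Nat × String := pvAltStep st (some x)

theorem pv_foldl_filter (test : List (Option String)) (st : Nat × String) :
    test.foldl pvAltStep st = (test.filterMap id).foldl pvStepS st := by
  induction test generalizing st with
  | nil => rfl
  | cons o t ih => cases o <;> simp [pvAltStep, pvStepS, ih]

theorem pv_fold0 (ts : List String) (b : String) :
    ts.foldl pvStepS (0, b) = (0, b) := by
  induction ts with
  | nil => rfl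
  | cons x ts ih =>
    have hs : pvStepS (0, b) x = (0, b) := by
      simp only [pvStepS, pvAltStep]
      cases pvRankFrom x 0 ["'h'", "'n'", "'l'"] <;> simp
    rw [List.foldl_cons, hs, ih]

theorem pv_fold1 (ts : List String) (b : String) :
    (ts.foldl pvStepS (1, b)).2 = (ts.find? (fun x => PySem.Str.isIn "'h'" x)).getD b := by
  induction ts generalizing b with
  | nil => rfl
  | cons x ts ih =>
    by_cases h0 : PySem.Chars.isIn ['\'', 'h', '\''] x.toList = true
    · have hs : pvStepS (1, b) x = (0, x) := by
        simp [pvStepS, pvAltStep, pvRankFrom, h0]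
      rw [List.foldl_cons, hs, pv_fold0,
        List.find?_cons_of_pos (p := fun x => PySem.Str.isIn "'h'" x) (by simp [h0])]
      rfl
    · have hs : pvStepS (1, b) x = (1, b) := by
        simp [pvStepS, pvAltStep, pvRankFrom, h0]; split_ifs <;> simp
      rw [List.foldl_cons, hs, ih,
        List.find?_cons_of_neg (p := fun x => PySem.Str.isIn "'h'" x) (by simp [h0])]

theorem pv_fold2 (ts : List String) (b : String) :
    (ts.foldl pvStepS (2, b)).2 =
      (ts.find? (fun x => PySem.Str.isIn "'h'" x)).getD
        ((ts.find? (fun x => PySem.Str.isIn "'n'" x)).getD b) := by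
  induction ts generalizing b with
  | nil => rfl
  | cons x ts ih =>
    by_cases h0 : PySem.Chars.isIn ['\'', 'h', '\''] x.toList = true
    · have hs : pvStepS (2, b) x = (0, x) := by
        simp [pvStepS, pvAltStep, pvRankFrom, h0]
      rw [List.foldl_cons, hs, pv_fold0,
        List.find?_cons_of_pos (p := fun x => PySem.Str.isIn "'h'" x) (by simp [h0])]
      rfl
    · by_cases h1 : PySem.Chars.isIn ['\'', 'n', '\''] x.toList = true
      · have hs : pvStepS (2, b) x = (1, x) := by
          simp [pvStepS, pvAltStep, pvRankFrom, h0, h1]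
        rw [List.foldl_cons, hs, pv_fold1,
          List.find?_cons_of_neg (p := fun x => PySem.Str.isIn "'h'" x) (by simp [h0]),
          List.find?_cons_of_pos (p := fun x => PySem.Str.isIn "'n'" x) (by simp [h1])]
        rfl
      · have hs : pvStepS (2, b) x = (2, b) := by
          simp [pvStepS, pvAltStep, pvRankFrom, h0, h1]; split_ifs <;> simp
        rw [List.foldl_cons, hs, ih,
          List.find?_cons_of_neg (p := fun x => PySem.Str.isIn "'h'" x) (by simp [h0]),
          List.find?_cons_of_neg (p := fun x => PySem.Str.isIn "'n'" x) (by simp [h1])]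

theorem pv_fold3 (ts : List String) (b : String) :
    (ts.foldl pvStepS (3, b)).2 =
      (ts.find? (fun x => PySem.Str.isIn "'h'" x)).getD
        ((ts.find? (fun x => PySem.Str.isIn "'n'" x)).getD
          ((ts.find? (fun x => PySem.Str.isIn "'l'" x)).getD b)) := by
  induction ts generalizing b with
  | nil => rfl
  | cons x ts ih =>
    by_cases h0 : PySem.Chars.isIn ['\'', 'h', '\''] x.toList = true
    · have hs : pvStepS (3, b) x = (0, x) := by
        simp [pvStepS, pvAltStep, pvRankFrom, h0]
      rw [List.foldl_cons, hs, pv_fold0,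
        List.find?_cons_of_pos (p := fun x => PySem.Str.isIn "'h'" x) (by simp [h0])]
      rfl
    · by_cases h1 : PySem.Chars.isIn ['\'', 'n', '\''] x.toList = true
      · have hs : pvStepS (3, b) x = (1, x) := by
          simp [pvStepS, pvAltStep, pvRankFrom, h0, h1]
        rw [List.foldl_cons, hs, pv_fold1,
          List.find?_cons_of_neg (p := fun x => PySem.Str.isIn "'h'" x) (by simp [h0]),
          List.find?_cons_of_pos (p := fun x => PySem.Str.isIn "'n'" x) (by simp [h1])]
        rfl
      · by_cases h2 : PySem.Chars.isIn ['\'', 'l', '\''] x.toList = true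
        · have hs : pvStepS (3, b) x = (2, x) := by
            simp [pvStepS, pvAltStep, pvRankFrom, h0, h1, h2]
          rw [List.foldl_cons, hs, pv_fold2,
            List.find?_cons_of_neg (p := fun x => PySem.Str.isIn "'h'" x) (by simp [h0]),
            List.find?_cons_of_neg (p := fun x => PySem.Str.isIn "'n'" x) (by simp [h1]),
            List.find?_cons_of_pos (p := fun x => PySem.Str.isIn "'l'" x) (by simp [h2])]
          rfl
        · have hs : pvStepS (3, b) x = (3, b) := by
            simp [pvStepS, pvAltStep, pvRankFrom, h0, h1, h2]
          rw [List.foldl_cons, hs, ih,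
            List.find?_cons_of_neg (p := fun x => PySem.Str.isIn "'h'" x) (by simp [h0]),
            List.find?_cons_of_neg (p := fun x => PySem.Str.isIn "'n'" x) (by simp [h1]),
            List.find?_cons_of_neg (p := fun x => PySem.Str.isIn "'l'" x) (by simp [h2])]

theorem pv_ago_eq (ts : List String) :
    pvAGo ts ["'h'", "'n'", "'l'"] =
      (ts.find? (fun x => PySem.Str.isIn "'h'" x)).getD
        ((ts.find? (fun x => PySem.Str.isIn "'n'" x)).getD
          ((ts.find? (fun x => PySem.Str.isIn "'l'" x)).getD "")) := by
  rw [show pvAGo ts ["'h'", "'n'", "'l'"] =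
      (if (ts.map (fun x => PySem.Str.isIn "'h'" x)).any id then
         match PySem.List.index? (ts.map (fun x => PySem.Str.isIn "'h'" x)) true with
         | some i => PySem.List.pyGetD ts (i : Int) ""
         | none => ""
       else
         if (ts.map (fun x => PySem.Str.isIn "'n'" x)).any id then
           match PySem.List.index? (ts.map (fun x => PySem.Str.isIn "'n'" x)) true with
           | some i => PySem.List.pyGetD ts (i : Int) ""
           | none => ""
         else
           if (ts.map (fun x => PySem.Str.isIn "'l'" x)).any id then
             match PySem.List.index? (ts.map (fun x => PySem.Str.isIn "'l'" x)) true with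
             | some i => PySem.List.pyGetD ts (i : Int) ""
             | none => ""
           else "") from rfl]
  rw [pv_branch_eq_find, pv_branch_eq_find, pv_branch_eq_find]

-- ===== VERDICT (by name: the statement is the Claim_ definition above) =====
theorem selectBestQuality_spec : Claim_equal_selectBestQuality := by
  intro test _
  unfold Spec_selectBestQuality selectBestQuality selectBestQuality_alt
  rw [pv_foldl_filter, pv_fold3, pv_ago_eq]
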